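-- pv_equiv track=rewrite | github.com/davityourway/Possible-States | plotting.py | find_states_mn
-- ===== SOURCE A (Python) =====
-- from math import factorial
--
-- def find_states_mn(positions: int):
--     """
--     determines how many possible states (of all kinds, even illegal) can come from a given mn
--     using the forumla from https://psyarxiv.com/rhq5j pg.19 of Supplemental Material
--
--     :param positions: total number of positions that can be filled
--     :return: total number of states
--     """
--     total = 1
--     positions = int(positions)
--     for turn in range(1, positions + 1):
--         m = turn // 2
--         n = turn - m
--         total += factorial(positions) // (factorial(n) * factorial(m) * factorial(positions - turn))
--     return total
-- ===== SOURCE B (Python) =====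
-- def find_states_mn(positions: int):
--     """Same count, but via a Pascal-triangle table instead of factorials:
--     the multinomial positions!/(n! m! (positions-turn)!) equals
--     C(positions, turn) * C(turn, m), read off the table."""
--     positions = int(positions)
--     # rows 0..positions of Pascal's triangle: tri[a][b] == C(a, b)
--     tri = [[1]]
--     for _ in range(positions):
--         prev = tri[-1]
--         row = [1]
--         for i in range(1, len(prev)):
--             row.append(prev[i - 1] + prev[i])
--         row.append(1)
--         tri.append(row)
--     total = 1
--     for turn in range(1, positions + 1):
--         m = turn // 2
--         total += tri[positions][turn] * tri[turn][m]
--     return total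
-- ===== Notes on version B (the rewrite author's own statement) =====
-- stated objective: alternative
-- what changed: Replaces per-term factorial computations and big-integer division by a Pascal-triangle table built with the additive recurrence, summing tri[positions][turn]*tri[turn][turn//2] with no division at all.
import Mathlib
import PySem

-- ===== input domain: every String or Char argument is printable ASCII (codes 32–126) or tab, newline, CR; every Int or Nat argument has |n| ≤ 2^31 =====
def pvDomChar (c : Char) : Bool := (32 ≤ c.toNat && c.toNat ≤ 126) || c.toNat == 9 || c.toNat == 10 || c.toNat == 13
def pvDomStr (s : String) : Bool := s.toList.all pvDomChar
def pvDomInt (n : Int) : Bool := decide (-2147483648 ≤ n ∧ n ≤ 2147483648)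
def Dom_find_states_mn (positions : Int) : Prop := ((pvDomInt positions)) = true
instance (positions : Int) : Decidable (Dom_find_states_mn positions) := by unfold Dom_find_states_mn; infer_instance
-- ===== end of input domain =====

-- B replaces the per-term factorial/division closed form by a Pascal-triangle table built with the additive recurrence, then sums products of its entries; alternative decomposition, same values.

-- ===== PORT A =====
-- math.factorial; this program only calls it on nonnegative arguments
def pyFact (n : Int) : Int := (Nat.factorial n.toNat : Int)

def find_states_mn (positions : Int) : Int :=
  (PySem.List.pyRange 1 (positions + 1) 1).foldl
    (fun total turn =>
      let m := PySem.Int.floordiv turn 2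
      let n := turn - m
      total + PySem.Int.floordiv (pyFact positions)
        (pyFact n * pyFact m * pyFact (positions - turn)))
    1

-- ===== PORT B =====
-- inner loop of Source B: the next Pascal row from the previous one
def nextRow (prev : List Int) : List Int :=
  ((PySem.List.pyRange 1 (prev.length : Int) 1).foldl
    (fun row i => row ++ [PySem.List.pyGetD prev (i - 1) 0 + PySem.List.pyGetD prev i 0])
    [1]) ++ [1]

def find_states_mn_alt (positions : Int) : Int :=
  let tri := (PySem.List.pyRange 0 positions 1).foldl
    (fun tri _ => tri ++ [nextRow (PySem.List.pyGetD tri (-1) [])]) [[1]]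
  (PySem.List.pyRange 1 (positions + 1) 1).foldl
    (fun total turn =>
      let m := PySem.Int.floordiv turn 2
      total + PySem.List.pyGetD (PySem.List.pyGetD tri positions []) turn 0 *
              PySem.List.pyGetD (PySem.List.pyGetD tri turn []) m 0)
    1

-- ===== PRECONDITION & SPEC =====
def Spec_find_states_mn (positions : Int) (out : Int) : Prop := out = find_states_mn_alt positions
instance (positions : Int) (out : Int) : Decidable (Spec_find_states_mn positions out) := by unfold Spec_find_states_mn; infer_instance

-- ===== CLAIM (what is proved, stated in full; the proofs are below) =====
def Claim_equal_find_states_mn : Prop := ∀ (positions : Int), Dom_find_states_mn positions → Spec_find_states_mn positions (find_states_mn positions)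

-- ===== LEMMAS AND PROOFS =====

/-- row `a` of Pascal's triangle, as integers -/
def rowFn (a : Nat) : List Int := (List.range (a + 1)).map (fun k => (a.choose k : Int))

theorem rowFn_zero : rowFn 0 = [1] := by decide

theorem getD_rowFn (a k : Nat) (hk : k < a + 1) :
    PySem.List.pyGetD (rowFn a) (k : Int) 0 = (a.choose k : Int) := by
  simp [rowFn, List.getD_eq_getElem?_getD, hk]

theorem getD_tri (M k : Nat) (hk : k < M + 1) :
    PySem.List.pyGetD ((List.range (M + 1)).map rowFn) (k : Int) [] = rowFn k := by
  simp [List.getD_eq_getElem?_getD, hk]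

theorem nextRow_rowFn (n : Nat) : nextRow (rowFn n) = rowFn (n + 1) := by
  have hlen : (rowFn n).length = n + 1 := by simp [rowFn]
  unfold nextRow
  rw [PySem.List.foldl_append_singleton_eq_map, hlen, PySem.List.pyRange_one]
  rw [show ((((n : Nat) + 1 : Nat) : Int) - 1).toNat = n by omega]
  rw [List.map_map]
  have hmap : ∀ k ∈ List.range n,
      ((fun i => PySem.List.pyGetD (rowFn n) (i - 1) 0 + PySem.List.pyGetD (rowFn n) i 0) ∘
        (fun k : Nat => (1 : Int) + (k : Int))) k = (((n + 1).choose (k + 1) : Nat) : Int) := by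
    intro k hk
    rw [List.mem_range] at hk
    show PySem.List.pyGetD (rowFn n) ((1 : Int) + (k : Int) - 1) 0 +
        PySem.List.pyGetD (rowFn n) ((1 : Int) + (k : Int)) 0 = (((n + 1).choose (k + 1) : Nat) : Int)
    rw [show (1 : Int) + (k : Int) - 1 = ((k : Nat) : Int) by omega]
    rw [show (1 : Int) + (k : Int) = (((k + 1 : Nat)) : Int) by push_cast; ring]
    rw [getD_rowFn n k (by omega), getD_rowFn n (k + 1) (by omega)]
    rw [Nat.choose_succ_succ]
    push_cast
    ring
  rw [List.map_congr_left hmap]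
  have : rowFn (n + 1) =
      [1] ++ (List.range n).map (fun k => (((n + 1).choose (k + 1) : Nat) : Int)) ++ [1] := by
    simp only [rowFn]
    rw [List.range_succ, List.map_append, List.range_succ_eq_map, List.map_cons, List.map_map]
    simp [Function.comp, Nat.choose_self, Nat.choose_zero_right]
  rw [this]

theorem tri_spec (N : Nat) :
    (PySem.List.pyRange 0 (N : Int) 1).foldl
      (fun tri _ => tri ++ [nextRow (PySem.List.pyGetD tri (-1) [])]) [[1]]
      = (List.range (N + 1)).map rowFn := by
  induction N with
  | zero =>
    rw [show ((0 : Nat) : Int) = (0 : Int) from rfl,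
      PySem.List.pyRange_one_eq_nil (le_refl 0)]
    simp [List.range_one, rowFn_zero]
  | succ N ih =>
    rw [show (((N + 1 : Nat)) : Int) = (N : Int) + 1 by push_cast; ring]
    rw [PySem.List.pyRange_one_succ_right (by exact_mod_cast Nat.zero_le N)]
    rw [List.foldl_append, ih]
    simp only [List.foldl]
    rw [show (List.range (N + 1)).map rowFn = (List.range N).map rowFn ++ [rowFn N] by
      rw [List.range_succ, List.map_append]; rfl]
    rw [PySem.List.pyGetD_neg_one_append_singleton, nextRow_rowFn]
    rw [List.range_succ, List.map_append, List.range_succ, List.map_append]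
    simp

/-- the Nat multinomial identity behind the term equality -/
theorem multinomial_eq (N t : Nat) (ht : t ≤ N) :
    Nat.factorial N /
      (Nat.factorial (t - t / 2) * Nat.factorial (t / 2) * Nat.factorial (N - t))
      = N.choose t * t.choose (t / 2) := by
  have hm : t / 2 ≤ t := Nat.div_le_self t 2
  have h1 := Nat.choose_mul_factorial_mul_factorial ht
  have h2 := Nat.choose_mul_factorial_mul_factorial hm
  have hD : 0 < Nat.factorial (t - t / 2) * Nat.factorial (t / 2) * Nat.factorial (N - t) :=
    Nat.mul_pos (Nat.mul_pos (Nat.factorial_pos _) (Nat.factorial_pos _)) (Nat.factorial_pos _)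
  have key : Nat.factorial N = (N.choose t * t.choose (t / 2)) *
      (Nat.factorial (t - t / 2) * Nat.factorial (t / 2) * Nat.factorial (N - t)) := by
    rw [← h1, ← h2]; ring
  rw [key, Nat.mul_div_cancel _ hD]

theorem pyFact_natCast (k : Nat) : pyFact (k : Int) = (Nat.factorial k : Int) := by
  simp [pyFact]

-- ===== VERDICT (by name: the statement is the Claim_ definition above) =====
theorem find_states_mn_spec : Claim_equal_find_states_mn := by
  intro positions _
  unfold Spec_find_states_mn find_states_mn find_states_mn_alt
  by_cases hp : positions ≤ 0
  · rw [PySem.List.pyRange_one_eq_nil (by omega : positions + 1 ≤ 1)]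
    simp
  · rw [not_le] at hp
    obtain ⟨N, rfl⟩ : ∃ N : Nat, positions = (N : Int) := ⟨positions.toNat, by omega⟩
    rw [tri_spec N]
    show List.foldl _ 1 _ = List.foldl _ 1 _
    refine PySem.List.foldl_congr_mem _ _ _ _ ?_
    intro acc turn hmem
    rw [PySem.List.mem_pyRange_one] at hmem
    obtain ⟨t, rfl⟩ : ∃ t : Nat, turn = (t : Int) := ⟨turn.toNat, by omega⟩
    have ht1 : 1 ≤ t := by omega
    have ht2 : t ≤ N := by omega
    dsimp only
    congr 1
    have hm2 : PySem.Int.floordiv (t : Int) 2 = ((t / 2 : Nat) : Int) := by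
      exact_mod_cast PySem.Int.floordiv_natCast t 2
    rw [hm2]
    rw [show (t : Int) - ((t / 2 : Nat) : Int) = ((t - t / 2 : Nat) : Int) by
      have := Nat.div_le_self t 2; omega]
    rw [show (N : Int) - (t : Int) = ((N - t : Nat) : Int) by omega]
    rw [pyFact_natCast, pyFact_natCast, pyFact_natCast, pyFact_natCast]
    rw [show (Nat.factorial (t - t / 2) : Int) * (Nat.factorial (t / 2) : Int) *
        (Nat.factorial (N - t) : Int) =
        ((Nat.factorial (t - t / 2) * Nat.factorial (t / 2) * Nat.factorial (N - t) : Nat) : Int) by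
      push_cast; ring]
    rw [PySem.Int.floordiv_natCast, multinomial_eq N t ht2]
    rw [getD_tri N N (by omega), getD_tri N t (by omega)]
    rw [getD_rowFn N t (by omega), getD_rowFn t (t / 2) (by
      have := Nat.div_le_self t 2; omega)]
    push_cast
    ring
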